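-- pv_equiv track=rewrite | github.com/Ryuya1995/pylearning | s2015.py | symbol2decimal
-- ===== SOURCE A (Python) =====
-- def symbol2decimal(x):
--     sym = ["a", "b", "c", "d", "e", "f", "g", "h"]
--     num = list(map(lambda x: ord(x) - 97, sym))
--     dic = dict(zip(sym, num))
--     k = ans = 0
--     while x:
--         x, p = x[:-1], x[-1]
--         ans += dic[p] * (8 ** k)
--         k += 1
--     return ans
-- ===== SOURCE B (Python) =====
-- def symbol2decimal(x):
--     ans = 0
--     for c in x:
--         ans = ans * 8 + (ord(c) - 97)
--     return ans
-- ===== Notes on version B (the rewrite author's own statement) =====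
-- stated objective: faster
-- what changed: Replaced A's right-to-left loop that reslices the string and recomputes 8**k at every step (and its dict lookup) with a single left-to-right Horner pass that multiplies the accumulator by 8 and adds each digit.
import Mathlib
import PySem

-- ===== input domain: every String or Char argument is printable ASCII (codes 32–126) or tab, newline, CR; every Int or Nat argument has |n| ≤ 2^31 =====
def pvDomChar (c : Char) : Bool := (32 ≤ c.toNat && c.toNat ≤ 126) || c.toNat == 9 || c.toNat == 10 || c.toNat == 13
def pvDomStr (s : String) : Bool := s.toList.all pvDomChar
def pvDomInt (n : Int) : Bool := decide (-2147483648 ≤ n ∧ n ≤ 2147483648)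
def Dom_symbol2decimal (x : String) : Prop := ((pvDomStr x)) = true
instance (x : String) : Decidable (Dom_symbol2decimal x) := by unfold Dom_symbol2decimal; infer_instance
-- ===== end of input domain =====

-- B replaces A's right-to-left loop (string reslicing + 8**k each step + dict lookup)
-- with one left-to-right Horner pass; equivalence on strings over 'a'..'h' (A raises KeyError otherwise).

-- ===== PORT A =====
def symA : List Char := ['a','b','c','d','e','f','g','h']
def dicA : PySem.Dict Char Int :=
  PySem.Dict.ofList (List.zip symA (symA.map (fun c => (c.toNat : Int) - 97)))

-- the while loop: x, p = x[:-1], x[-1]; ans += dic[p] * 8**k; k += 1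
-- (dic[p] raises KeyError for p ∉ symA; Pre_ excludes that, getD's default is never used inside Pre_)
def loopA : List Char → Nat → Int → Int
  | [], _, ans => ans
  | a :: t, k, ans =>
      loopA (a :: t).dropLast (k + 1) (ans + (dicA.getD (a :: t).getLast! 0) * (8 : Int) ^ k)
termination_by xs => xs.length
decreasing_by simp [List.length_dropLast]

def symbol2decimal (x : String) : Int := loopA x.toList 0 0

-- ===== PORT B =====
def symbol2decimal_alt (x : String) : Int :=
  x.toList.foldl (fun ans c => ans * 8 + ((c.toNat : Int) - 97)) 0

-- ===== PRECONDITION & SPEC =====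
-- Pre_ excludes exactly the inputs on which A raises KeyError (a character outside 'a'..'h').
def Pre_symbol2decimal (x : String) : Prop := x.toList.all (fun c => c ∈ symA) = true
instance (x : String) : Decidable (Pre_symbol2decimal x) := by unfold Pre_symbol2decimal; infer_instance
def pvWitness_symbol2decimal : String := "cab"

def Spec_symbol2decimal (x : String) (out : Int) : Prop := out = symbol2decimal_alt x
instance (x : String) (out : Int) : Decidable (Spec_symbol2decimal x out) := by unfold Spec_symbol2decimal; infer_instance

-- ===== CLAIM (what is proved, stated in full; the proofs are below) =====
def Claim_equal_symbol2decimal : Prop := ∀ (x : String), Dom_symbol2decimal x → Pre_symbol2decimal x → Spec_symbol2decimal x (symbol2decimal x)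
-- ===== LEMMAS AND PROOFS =====

-- digit value agreement on symA
lemma dicA_getD_of_mem {c : Char} (h : c ∈ symA) :
    dicA.getD c 0 = (c.toNat : Int) - 97 := by
  fin_cases h <;> decide

lemma getLast!_concat' (ys : List Char) (c : Char) : (ys ++ [c]).getLast! = c := by
  cases ys with
  | nil => rfl
  | cons a t => simp [List.getLast!]

lemma loopA_nil (k : Nat) (ans : Int) : loopA [] k ans = ans := by
  rw [loopA]

lemma loopA_concat (ys : List Char) (c : Char) (k : Nat) (ans : Int) :
    loopA (ys ++ [c]) k ans = loopA ys (k + 1) (ans + (dicA.getD c 0) * (8 : Int) ^ k) := by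
  cases hy : ys ++ [c] with
  | nil => simp at hy
  | cons a t =>
      rw [loopA, ← hy, List.dropLast_concat, getLast!_concat']

def hornerB (xs : List Char) : Int :=
  xs.foldl (fun ans c => ans * 8 + ((c.toNat : Int) - 97)) 0

lemma loopA_horner (xs : List Char) (hmem : ∀ c ∈ xs, c ∈ symA) :
    ∀ (k : Nat) (ans : Int), loopA xs k ans = ans + (8 : Int) ^ k * hornerB xs := by
  induction xs using List.reverseRecOn with
  | nil => intro k ans; simp [loopA_nil, hornerB]
  | append_singleton ys c ih =>
      intro k ans
      have hc : c ∈ symA := hmem c (by simp)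
      have hys : ∀ d ∈ ys, d ∈ symA := fun d hd => hmem d (by simp [hd])
      rw [loopA_concat ys c k ans, ih hys, dicA_getD_of_mem hc]
      have : hornerB (ys ++ [c]) = hornerB ys * 8 + ((c.toNat : Int) - 97) := by
        simp [hornerB, List.foldl_append]
      rw [this]
      ring

-- ===== VERDICT =====
theorem symbol2decimal_spec : Claim_equal_symbol2decimal := by
  intro x _ hpre
  rw [Pre_symbol2decimal, List.all_eq_true] at hpre
  simp only [decide_eq_true_eq] at hpre
  unfold Spec_symbol2decimal symbol2decimal symbol2decimal_alt
  rw [loopA_horner x.toList hpre 0 0]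
  simp [hornerB]
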